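-- pv_equiv track=rewrite | github.com/peyer/qcom_hexagon_sdk | tools/HEXAGON_Tools/8.3.07/Tools/lib/profiler/proftool.py | function_aggregate
-- ===== SOURCE A (Python) =====
-- def function_aggregate(pc_stats,pc_to_func):
--     funcstalls = {}
--     stallfuncs = {}
--     for pc,data in pc_stats.items():
--         func = pc_to_func.get(pc,"unknown")
--         for stat,count in data.items():
--             fstallhist = funcstalls.setdefault(func,{})
--             fstallhist[stat] = fstallhist.get(stat,0) + count
--     for func,data in funcstalls.items():
--         for stat,count in data.items():
--             funchist = stallfuncs.setdefault(stat,{})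
--             funchist[func] = funchist.get(func,0) + count
--     return (funcstalls,stallfuncs)
-- ===== SOURCE B (Python) =====
-- def function_aggregate(pc_stats, pc_to_func):
--     # group the per-pc stat dicts by function (insertion order = first pc of each function)
--     groups = {}
--     for pc, data in pc_stats.items():
--         if data:  # an empty stat dict contributes nothing
--             groups.setdefault(pc_to_func.get(pc, "unknown"), []).append(data)
--     # reduce each group: sum the stat counts of that function's pcs
--     funcstalls = {}
--     for func, dicts in groups.items():
--         hist = {}
--         for d in dicts:
--             for stat, count in d.items():
--                 hist[stat] = hist.get(stat, 0) + count
--         funcstalls[func] = hist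
--     # transpose funcstalls: stats in row-major first-appearance order
--     stat_order = []
--     for hist in funcstalls.values():
--         for stat in hist:
--             if stat not in stat_order:
--                 stat_order.append(stat)
--     stallfuncs = {stat: {func: hist[stat] for func, hist in funcstalls.items() if stat in hist}
--                   for stat in stat_order}
--     return (funcstalls, stallfuncs)
-- ===== Notes on version B (the rewrite author's own statement) =====
-- stated objective: alternative
-- what changed: Replaces A's two accumulation passes by a group-by-function/reduce pipeline for funcstalls and a pure transpose (explicit stat order + per-stat comprehension over the rows) for stallfuncs, instead of interleaved setdefault mutation.
import Mathlib
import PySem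

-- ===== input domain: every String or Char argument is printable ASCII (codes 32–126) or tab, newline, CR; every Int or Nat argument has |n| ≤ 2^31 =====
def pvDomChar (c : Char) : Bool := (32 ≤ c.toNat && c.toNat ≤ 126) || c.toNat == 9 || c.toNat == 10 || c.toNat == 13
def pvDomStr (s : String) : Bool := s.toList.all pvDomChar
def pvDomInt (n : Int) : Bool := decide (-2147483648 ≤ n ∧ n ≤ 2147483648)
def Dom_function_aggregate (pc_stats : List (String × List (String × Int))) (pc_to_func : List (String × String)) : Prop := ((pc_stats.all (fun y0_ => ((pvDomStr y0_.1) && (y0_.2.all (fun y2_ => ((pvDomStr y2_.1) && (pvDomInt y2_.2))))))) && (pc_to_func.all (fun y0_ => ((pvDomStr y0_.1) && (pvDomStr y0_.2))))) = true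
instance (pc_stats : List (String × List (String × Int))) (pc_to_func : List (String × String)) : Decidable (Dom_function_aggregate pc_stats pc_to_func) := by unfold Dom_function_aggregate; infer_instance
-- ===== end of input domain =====

-- B recomputes the same two histograms by a different decomposition — group-by-function +
-- reduce for funcstalls and an explicit-order transpose comprehension for stallfuncs —
-- instead of A's two interleaved setdefault-accumulation passes (objective: alternative).

-- ===== PORT A =====
-- The Python arguments are dicts; the association lists are normalized with Dict.ofList
-- (both ports do this) and the loops iterate the dicts' items, as the Python does.
def function_aggregate (pc_stats : List (String × List (String × Int))) (pc_to_func : List (String × String)) : (List (String × List (String × Int))) × (List (String × List (String × Int))) :=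
  let ps : List (String × List (String × Int)) :=
    (PySem.Dict.ofList (pc_stats.map (fun p => (p.1, (PySem.Dict.ofList p.2).items)))).items
  let fd : PySem.Dict String String := PySem.Dict.ofList pc_to_func
  let funcstalls : PySem.Dict String (PySem.Dict String Int) :=
    ps.foldl (fun fs p =>
      let func := fd.getD p.1 "unknown"
      p.2.foldl (fun fs q =>
        -- fstallhist = funcstalls.setdefault(func,{}); fstallhist[stat] = fstallhist.get(stat,0)+count
        fs.modify func PySem.Dict.empty (fun h => h.insert q.1 (h.getD q.1 0 + q.2))) fs)
      PySem.Dict.empty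
  let stallfuncs : PySem.Dict String (PySem.Dict String Int) :=
    funcstalls.items.foldl (fun sf r =>
      r.2.items.foldl (fun sf q =>
        -- funchist = stallfuncs.setdefault(stat,{}); funchist[func] = funchist.get(func,0)+count
        sf.modify q.1 PySem.Dict.empty (fun h => h.insert r.1 (h.getD r.1 0 + q.2))) sf)
      PySem.Dict.empty
  (funcstalls.items.map (fun r => (r.1, r.2.items)), stallfuncs.items.map (fun r => (r.1, r.2.items)))

-- ===== PORT B =====
def function_aggregate_alt (pc_stats : List (String × List (String × Int))) (pc_to_func : List (String × String)) : (List (String × List (String × Int))) × (List (String × List (String × Int))) :=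
  let ps : List (String × List (String × Int)) :=
    (PySem.Dict.ofList (pc_stats.map (fun p => (p.1, (PySem.Dict.ofList p.2).items)))).items
  let fd : PySem.Dict String String := PySem.Dict.ofList pc_to_func
  -- group the non-empty per-pc stat dicts by function
  -- (groups.setdefault(func, []).append(data)  =  groups[func] = groups.get(func, []) + [data], i.e. modify)
  let groups : PySem.Dict String (List (List (String × Int))) :=
    ps.foldl (fun g p =>
      if p.2.isEmpty then g
      else g.modify (fd.getD p.1 "unknown") [] (fun l => l ++ [p.2])) PySem.Dict.empty
  -- reduce each group: sum the stat counts of that function's pcs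
  let funcstalls : PySem.Dict String (PySem.Dict String Int) :=
    groups.items.foldl (fun fs r =>
      fs.insert r.1 (r.2.foldl (fun h d =>
        d.foldl (fun h q => h.insert q.1 (h.getD q.1 0 + q.2)) h) PySem.Dict.empty)) PySem.Dict.empty
  -- stats in row-major first-appearance order
  let statOrder : List String :=
    funcstalls.values.foldl (fun ord h =>
      h.keys.foldl (fun ord s => if s ∈ ord then ord else ord ++ [s]) ord) []
  -- transpose funcstalls (dict comprehension = fold of inserts)
  let stallfuncs : PySem.Dict String (PySem.Dict String Int) :=
    statOrder.foldl (fun sf s =>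
      sf.insert s (funcstalls.items.foldl (fun h r =>
        if r.2.contains s then h.insert r.1 (r.2.getD s 0) else h) PySem.Dict.empty)) PySem.Dict.empty
  (funcstalls.items.map (fun r => (r.1, r.2.items)), stallfuncs.items.map (fun r => (r.1, r.2.items)))

-- ===== PRECONDITION & SPEC =====
def Spec_function_aggregate (pc_stats : List (String × List (String × Int))) (pc_to_func : List (String × String)) (out : (List (String × List (String × Int))) × (List (String × List (String × Int)))) : Prop := out = function_aggregate_alt pc_stats pc_to_func
instance (pc_stats : List (String × List (String × Int))) (pc_to_func : List (String × String)) (out : (List (String × List (String × Int))) × (List (String × List (String × Int)))) : Decidable (Spec_function_aggregate pc_stats pc_to_func out) := by unfold Spec_function_aggregate; infer_instance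

-- ===== CLAIM (what is proved, stated in full; the proofs are below) =====
def Claim_equal_function_aggregate : Prop := ∀ (pc_stats : List (String × List (String × Int))) (pc_to_func : List (String × String)), Dom_function_aggregate pc_stats pc_to_func → Spec_function_aggregate pc_stats pc_to_func (function_aggregate pc_stats pc_to_func)

-- ===== LEMMAS AND PROOFS =====

-- abbreviations for the pieces of the two pipelines (proof-side only)
def pvMrg (h : PySem.Dict String Int) (d : List (String × Int)) : PySem.Dict String Int :=
  d.foldl (fun h q => h.insert q.1 (h.getD q.1 0 + q.2)) h

def pvReduce (ds : List (List (String × Int))) : PySem.Dict String Int :=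
  ds.foldl pvMrg PySem.Dict.empty

def pvBuild (g : PySem.Dict String (List (List (String × Int)))) : PySem.Dict String (PySem.Dict String Int) :=
  g.items.foldl (fun fs r => fs.insert r.1 (pvReduce r.2)) PySem.Dict.empty

def pvOrd (o : List String) (ks : List String) : List String :=
  ks.foldl (fun o s => if s ∈ o then o else o ++ [s]) o

def pvOrdAll (rs : List (String × PySem.Dict String Int)) : List String :=
  rs.foldl (fun o r => pvOrd o r.2.keys) []

def pvCol (s : String) (rs : List (String × PySem.Dict String Int)) : PySem.Dict String Int :=
  rs.foldl (fun h r => if r.2.contains s then h.insert r.1 (r.2.getD s 0) else h) PySem.Dict.empty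

theorem pvMrg_nodup (h : PySem.Dict String Int) (d : List (String × Int)) (hh : h.keys.Nodup) :
    (pvMrg h d).keys.Nodup :=
  PySem.Dict.nodup_keys_foldl_insert_key d Prod.fst (fun h q => h.getD q.1 0 + q.2) h hh

theorem pvFoldMrg_nodup : ∀ (ds : List (List (String × Int))) (h : PySem.Dict String Int),
    h.keys.Nodup → (ds.foldl pvMrg h).keys.Nodup
  | [], _, hh => hh
  | d :: ds, h, hh => pvFoldMrg_nodup ds _ (pvMrg_nodup h d hh)

theorem pvReduce_nodup (ds : List (List (String × Int))) : (pvReduce ds).keys.Nodup :=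
  pvFoldMrg_nodup ds PySem.Dict.empty (by rw [PySem.Dict.keys_empty]; exact List.nodup_nil)

theorem pv_inner_collapse (f : String) (d : List (String × Int)) (hd : d ≠ [])
    (fs : PySem.Dict String (PySem.Dict String Int)) :
    d.foldl (fun fs q => fs.insert f (((fs.getD f PySem.Dict.empty).insert q.1
        ((fs.getD f PySem.Dict.empty).getD q.1 0 + q.2)))) fs
      = fs.insert f (pvMrg (fs.getD f PySem.Dict.empty) d) := by
  induction d generalizing fs with
  | nil => exact absurd rfl hd
  | cons q d' ih =>
    rw [List.foldl_cons]
    cases d' with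
    | nil => simp [pvMrg]
    | cons q2 d2 =>
      rw [ih (by simp)]
      rw [PySem.Dict.getD_insert_self, PySem.Dict.insert_insert_self]
      simp [pvMrg]

theorem pvBuild_items (g : PySem.Dict String (List (List (String × Int)))) (hg : g.keys.Nodup) :
    (pvBuild g).items = g.items.map (fun r => (r.1, pvReduce r.2)) := by
  have := PySem.Dict.items_foldl_insert_fresh g.items Prod.fst (fun r => pvReduce r.2)
    PySem.Dict.empty (fun a _ => by simp [PySem.Dict.contains_empty]) hg
  simpa [pvBuild] using this

theorem pvBuild_keys (g : PySem.Dict String (List (List (String × Int)))) (hg : g.keys.Nodup) :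
    (pvBuild g).keys = g.keys := by
  simp [PySem.Dict.keys, pvBuild_items g hg, List.map_map, Function.comp]

theorem pvBuild_getD (g : PySem.Dict String (List (List (String × Int)))) (hg : g.keys.Nodup)
    (f : String) : (pvBuild g).getD f PySem.Dict.empty = pvReduce (g.getD f []) := by
  by_cases hc : g.contains f = true
  · rw [PySem.Dict.contains_eq_isSome_get?] at hc
    obtain ⟨v, hv⟩ := Option.isSome_iff_exists.mp hc
    have hmem : (f, v) ∈ g.items := PySem.Dict.mem_items_of_get?_eq_some g hv
    have hmem' : (f, pvReduce v) ∈ (pvBuild g).items := by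
      rw [pvBuild_items g hg]
      exact List.mem_map.mpr ⟨(f, v), hmem, rfl⟩
    rw [PySem.Dict.getD_of_mem_items _ hmem' (by rw [pvBuild_keys g hg]; exact hg),
      PySem.Dict.getD_of_get?_eq_some g [] hv]
  · have hc' : (pvBuild g).contains f = false := by
      rw [PySem.Dict.contains_eq_decide_mem_keys, pvBuild_keys g hg,
        ← PySem.Dict.contains_eq_decide_mem_keys]
      exact Bool.not_eq_true _ ▸ hc
    rw [PySem.Dict.getD_of_not_contains _ _ hc',
      PySem.Dict.getD_of_not_contains _ [] (Bool.not_eq_true _ ▸ hc : g.contains f = false)]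
    rfl

theorem pvBuild_insert (g : PySem.Dict String (List (List (String × Int)))) (hg : g.keys.Nodup)
    (f : String) (v : List (List (String × Int))) :
    pvBuild (g.insert f v) = (pvBuild g).insert f (pvReduce v) := by
  apply PySem.Dict.ext
  have hcc : (pvBuild g).contains f = g.contains f := by
    rw [PySem.Dict.contains_eq_decide_mem_keys, PySem.Dict.contains_eq_decide_mem_keys,
      pvBuild_keys g hg]
  rw [pvBuild_items _ (PySem.Dict.nodup_keys_insert g f v hg),
    PySem.Dict.items_insert, PySem.Dict.items_insert, hcc, pvBuild_items g hg]
  by_cases hc : g.contains f = true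
  · simp only [hc, if_true, List.map_map]
    refine List.map_congr_left (fun p _ => ?_)
    by_cases hp : p.1 = f <;> simp [Function.comp, hp]
  · simp [hc, List.map_append]

theorem pvBstep_nodup (F : String → String) (ps : List (String × List (String × Int)))
    (g : PySem.Dict String (List (List (String × Int)))) (hg : g.keys.Nodup) :
    (ps.foldl (fun g p => if p.2.isEmpty then g
        else g.modify (F p.1) [] (fun l => l ++ [p.2])) g).keys.Nodup := by
  induction ps generalizing g with
  | nil => exact hg
  | cons p ps ih =>
    rw [List.foldl_cons]
    split
    · exact ih g hg
    · exact ih _ (PySem.Dict.nodup_keys_insert _ _ _ hg)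

theorem pv_group (F : String → String) (ps : List (String × List (String × Int)))
    (g : PySem.Dict String (List (List (String × Int)))) (hg : g.keys.Nodup) :
    ps.foldl (fun fs p => p.2.foldl (fun fs q => fs.modify (F p.1) PySem.Dict.empty
        (fun h => h.insert q.1 (h.getD q.1 0 + q.2))) fs) (pvBuild g)
      = pvBuild (ps.foldl (fun g p => if p.2.isEmpty then g
        else g.modify (F p.1) [] (fun l => l ++ [p.2])) g) := by
  induction ps generalizing g with
  | nil => rfl
  | cons p ps ih =>
    rw [List.foldl_cons, List.foldl_cons]
    by_cases hp : p.2.isEmpty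
    · rw [List.isEmpty_iff.mp hp]
      simpa [List.isEmpty_iff.mp hp] using ih g hg
    · have hne : p.2 ≠ [] := by simpa [List.isEmpty_iff] using hp
      have hstep : p.2.foldl (fun fs q => fs.modify (F p.1) PySem.Dict.empty
          (fun h => h.insert q.1 (h.getD q.1 0 + q.2))) (pvBuild g)
          = pvBuild (g.insert (F p.1) (g.getD (F p.1) [] ++ [p.2])) := by
        simp only [PySem.Dict.modify]
        rw [pv_inner_collapse (F p.1) p.2 hne (pvBuild g), pvBuild_getD g hg (F p.1),
          pvBuild_insert g hg]
        congr 1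
        simp [pvReduce, List.foldl_append]
      rw [hstep, if_neg hp]
      have : g.modify (F p.1) [] (fun l => l ++ [p.2])
          = g.insert (F p.1) (g.getD (F p.1) [] ++ [p.2]) := rfl
      rw [this] at *
      exact ih _ (PySem.Dict.nodup_keys_insert _ _ _ hg)

theorem pvOrd_nodup (o : List String) (ks : List String) (ho : o.Nodup) : (pvOrd o ks).Nodup := by
  induction ks generalizing o with
  | nil => exact ho
  | cons k ks ih =>
    rw [pvOrd, List.foldl_cons]
    split
    · exact ih o ho
    · rename_i hk
      refine ih _ ?_
      rw [← List.concat_eq_append, List.nodup_concat]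
      exact ⟨hk, ho⟩

theorem pv_mem_pvOrd (o : List String) (ks : List String) (x : String) :
    x ∈ pvOrd o ks ↔ x ∈ o ∨ x ∈ ks := by
  induction ks generalizing o with
  | nil => simp [pvOrd]
  | cons k ks ih =>
    rw [pvOrd, List.foldl_cons]
    by_cases hk : k ∈ o
    · rw [if_pos hk, ← pvOrd]
      rw [ih o]
      constructor
      · rintro (h | h) <;> simp_all
      · rintro (h | h)
        · exact Or.inl h
        · rcases List.mem_cons.mp h with h | h
          · exact Or.inl (h ▸ hk)
          · exact Or.inr h
    · rw [if_neg hk, ← pvOrd, ih _]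
      simp [or_assoc]

theorem pvOrdAll_aux_nodup : ∀ (rs : List (String × PySem.Dict String Int)) (o : List String),
    o.Nodup → (rs.foldl (fun o r => pvOrd o r.2.keys) o).Nodup
  | [], _, ho => ho
  | r :: rs, o, ho => pvOrdAll_aux_nodup rs _ (pvOrd_nodup o r.2.keys ho)

theorem pvOrdAll_nodup (rs : List (String × PySem.Dict String Int)) : (pvOrdAll rs).Nodup :=
  pvOrdAll_aux_nodup rs [] List.nodup_nil

theorem pvOrdAll_append (rs : List (String × PySem.Dict String Int)) (r : String × PySem.Dict String Int) :
    pvOrdAll (rs ++ [r]) = pvOrd (pvOrdAll rs) r.2.keys := by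
  simp [pvOrdAll, List.foldl_append]

theorem pv_mem_ordAll (rs : List (String × PySem.Dict String Int)) (s : String) :
    s ∈ pvOrdAll rs ↔ ∃ r ∈ rs, s ∈ r.2.keys := by
  have aux : ∀ (rs : List (String × PySem.Dict String Int)) (o : List String),
      s ∈ rs.foldl (fun o r => pvOrd o r.2.keys) o ↔ s ∈ o ∨ ∃ r ∈ rs, s ∈ r.2.keys := by
    intro rs
    induction rs with
    | nil => simp
    | cons r rs ih =>
      intro o
      rw [List.foldl_cons, ih, pv_mem_pvOrd]
      simp [or_assoc]
  simpa using aux rs []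

theorem pvCol_keys (s : String) (rs : List (String × PySem.Dict String Int)) (x : String)
    (hx : x ∈ (pvCol s rs).keys) : x ∈ rs.map Prod.fst := by
  have aux : ∀ (rs : List (String × PySem.Dict String Int)) (h : PySem.Dict String Int),
      x ∈ (rs.foldl (fun h r => if r.2.contains s then h.insert r.1 (r.2.getD s 0) else h) h).keys
      → x ∈ h.keys ∨ x ∈ rs.map Prod.fst := by
    intro rs
    induction rs with
    | nil => exact fun h hx => Or.inl hx
    | cons r rs ih =>
      intro h hx
      rw [List.foldl_cons] at hx
      rcases ih _ hx with hk | hk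
      · by_cases hc : r.2.contains s = true
        · rw [if_pos hc] at hk
          rcases (PySem.Dict.mem_keys_insert h r.1 x (r.2.getD s 0)).mp hk with h1 | h1
          · exact Or.inr (by simp [h1])
          · exact Or.inl h1
        · rw [if_neg hc] at hk
          exact Or.inl hk
      · exact Or.inr (by simp only [List.map_cons, List.mem_cons]; exact Or.inr hk)
  rcases aux rs PySem.Dict.empty hx with h | h
  · rw [PySem.Dict.keys_empty] at h
    exact absurd h (List.not_mem_nil)
  · exact h

theorem pvCol_empty (s : String) (rs : List (String × PySem.Dict String Int))
    (h : ∀ r ∈ rs, r.2.contains s = false) : pvCol s rs = PySem.Dict.empty := by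
  induction rs with
  | nil => rfl
  | cons r rs ih =>
    have := h r (by simp)
    rw [pvCol, List.foldl_cons, if_neg (by simp [this])]
    exact ih (fun r hr => h r (by simp [hr]))

theorem pvCol_append (s : String) (rs : List (String × PySem.Dict String Int))
    (r : String × PySem.Dict String Int) :
    pvCol s (rs ++ [r]) = if r.2.contains s then (pvCol s rs).insert r.1 (r.2.getD s 0)
      else pvCol s rs := by
  simp [pvCol, List.foldl_append]

theorem pv_transpose_inner (f : String) (L : List (String × Int))
    (sf : PySem.Dict String (PySem.Dict String Int)) (O : List String)
    (colf : String → PySem.Dict String Int)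
    (hO : O.Nodup) (hL : (L.map Prod.fst).Nodup)
    (hsf : sf.items = O.map (fun s => (s, colf s)))
    (hout : ∀ s, s ∉ O → colf s = PySem.Dict.empty)
    (hfresh : ∀ s ∈ L.map Prod.fst, (colf s).contains f = false) :
    (L.foldl (fun sf q => sf.insert q.1 (((sf.getD q.1 PySem.Dict.empty).insert f
        ((sf.getD q.1 PySem.Dict.empty).getD f 0 + q.2)))) sf).items
      = (pvOrd O (L.map Prod.fst)).map (fun s => (s,
          match L.find? (fun q => q.1 == s) with
          | some qc => (colf s).insert f qc.2
          | none => colf s)) := by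
  induction L generalizing sf O colf with
  | nil =>
    rw [List.foldl_nil, hsf]
    simp only [List.map_nil, List.find?_nil, pvOrd, List.foldl_nil]
  | cons q L' ih =>
    have hkeys : sf.keys = O := by
      rw [PySem.Dict.keys, hsf, List.map_map]
      exact List.map_id _
    have hq1 : sf.getD q.1 PySem.Dict.empty = colf q.1 := by
      by_cases hmem : q.1 ∈ O
      · exact PySem.Dict.getD_of_mem_items sf
          (by rw [hsf]; exact List.mem_map.mpr ⟨q.1, hmem, rfl⟩)
          (by rw [hkeys]; exact hO) _
      · rw [PySem.Dict.getD_of_not_contains _ _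
          (by rw [PySem.Dict.contains_eq_decide_mem_keys, hkeys]; simp [hmem]), hout q.1 hmem]
    have hz : (colf q.1).getD f 0 = 0 :=
      PySem.Dict.getD_of_not_contains _ 0 (hfresh q.1 (by simp))
    simp only [List.map_cons, List.nodup_cons] at hL
    have hqL' : q.1 ∉ L'.map Prod.fst := hL.1
    rw [List.foldl_cons, hq1, hz, zero_add]
    have hO1 : (if q.1 ∈ O then O else O ++ [q.1]).Nodup := by
      split
      · exact hO
      · rename_i hmem
        rw [← List.concat_eq_append, List.nodup_concat]
        exact ⟨hmem, hO⟩
    have hitems1 : (sf.insert q.1 ((colf q.1).insert f q.2)).items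
        = (if q.1 ∈ O then O else O ++ [q.1]).map (fun s => (s,
            if s = q.1 then (colf q.1).insert f q.2 else colf s)) := by
      rw [PySem.Dict.items_insert]
      have hcont : sf.contains q.1 = decide (q.1 ∈ O) := by
        rw [PySem.Dict.contains_eq_decide_mem_keys, hkeys]
      by_cases hmem : q.1 ∈ O
      · rw [hcont, if_pos hmem, decide_eq_true_eq.mpr hmem]  -- keep branch
        rw [hsf, List.map_map]
        refine List.map_congr_left (fun s _ => ?_)
        by_cases hsq : s = q.1 <;> simp [Function.comp, hsq]
      · rw [hcont, if_neg hmem]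
        simp only [decide_eq_true_eq, hmem, if_false, hsf]
        rw [List.map_append]
        congr 1
        · refine List.map_congr_left (fun s hs => ?_)
          have : s ≠ q.1 := fun h => hmem (h ▸ hs)
          simp [this]
        · simp
    rw [ih ((sf.insert q.1 ((colf q.1).insert f q.2)))
        (if q.1 ∈ O then O else O ++ [q.1])
        (fun s => if s = q.1 then (colf q.1).insert f q.2 else colf s)
        hO1
        hL.2
        hitems1
        (by
          intro s hs
          have hsO : s ∉ O := fun h => hs (by split <;> simp [h])
          have hsq : s ≠ q.1 := fun h => hs (by subst h; split <;> simp_all)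
          simp only [if_neg hsq]
          exact hout s hsO)
        (by
          intro s hs
          have hsq : s ≠ q.1 := fun h => hqL' (h ▸ hs)
          simp only [if_neg hsq]
          exact hfresh s (by simp only [List.map_cons, List.mem_cons]; exact Or.inr hs))]
    have hord : pvOrd O ((q :: L').map Prod.fst)
        = pvOrd (if q.1 ∈ O then O else O ++ [q.1]) (L'.map Prod.fst) := by
      rw [List.map_cons]
      rfl
    rw [hord]
    refine List.map_congr_left (fun s _ => ?_)
    by_cases hsq : s = q.1
    · have hfind : L'.find? (fun qq => qq.1 == s) = none :=
        List.find?_eq_none.mpr (fun x hx => by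
          simp only [beq_iff_eq]
          intro h
          exact hqL' (by rw [← hsq, ← h]; exact List.mem_map_of_mem hx))
      have hfind2 : (q :: L').find? (fun qq => qq.1 == s) = some q := by
        simp [beq_iff_eq.mpr hsq.symm]
      rw [hfind, hfind2]
      simp [hsq]
    · have hhead : (q.1 == s) = false := beq_eq_false_iff_ne.mpr (fun h => hsq h.symm)
      have : (q :: L').find? (fun qq => qq.1 == s) = L'.find? (fun qq => qq.1 == s) := by
        simp only [List.find?_cons, hhead]
      rw [this]
      cases hf : L'.find? (fun qq => qq.1 == s) <;> simp [hsq]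

theorem pv_transpose (rs : List (String × PySem.Dict String Int))
    (hnd : (rs.map Prod.fst).Nodup) (hrows : ∀ r ∈ rs, r.2.keys.Nodup) :
    (rs.foldl (fun sf r => r.2.items.foldl (fun sf q => sf.modify q.1 PySem.Dict.empty
        (fun h => h.insert r.1 (h.getD r.1 0 + q.2))) sf) PySem.Dict.empty).items
      = (pvOrdAll rs).map (fun s => (s, pvCol s rs)) := by
  induction rs using List.reverseRecOn with
  | nil => rfl
  | append_singleton rs r ih =>
    rw [List.map_append, List.map_singleton, ← List.concat_eq_append, List.nodup_concat] at hnd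
    have hr1 : r.1 ∉ rs.map Prod.fst := by simpa using hnd.1
    have hndrs : (rs.map Prod.fst).Nodup := hnd.2
    have hrowsrs : ∀ x ∈ rs, x.2.keys.Nodup := fun x hx => hrows x (by simp [hx])
    have hist : r.2.keys.Nodup := hrows r (by simp)
    rw [List.foldl_append, List.foldl_cons, List.foldl_nil]
    have hmodify : (fun (sf : PySem.Dict String (PySem.Dict String Int)) (q : String × Int) =>
        sf.modify q.1 PySem.Dict.empty (fun h => h.insert r.1 (h.getD r.1 0 + q.2)))
        = (fun sf q => sf.insert q.1 ((sf.getD q.1 PySem.Dict.empty).insert r.1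
            ((sf.getD q.1 PySem.Dict.empty).getD r.1 0 + q.2))) := rfl
    rw [hmodify]
    rw [pv_transpose_inner r.1 r.2.items _ (pvOrdAll rs) (fun s => pvCol s rs)
        (pvOrdAll_nodup rs) hist (ih hndrs hrowsrs)
        (fun s hs => pvCol_empty s rs (fun x hx => Bool.eq_false_iff.mpr (fun hc =>
          hs ((pv_mem_ordAll rs s).mpr ⟨x, hx, (PySem.Dict.contains_iff_mem_keys _ _).mp hc⟩))))
        (fun s _ => Bool.eq_false_iff.mpr (fun hc =>
          hr1 (pvCol_keys s rs r.1 ((PySem.Dict.contains_iff_mem_keys _ _).mp hc))))]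
    rw [pvOrdAll_append]
    have hkeq : r.2.items.map Prod.fst = r.2.keys := rfl
    rw [hkeq]
    refine List.map_congr_left (fun s _ => ?_)
    rw [pvCol_append]
    cases hf : r.2.items.find? (fun qq => qq.1 == s) with
    | none =>
      have hc : r.2.contains s = false := by
        rw [List.find?_eq_none] at hf
        simp only [PySem.Dict.contains, List.any_eq_false]
        exact fun p hp => by simpa using hf p hp
      rw [if_neg (by simp [hc])]
    | some qc =>
      have hget : r.2.get? s = some qc.2 := by simp [PySem.Dict.get?, hf]
      have hc : r.2.contains s = true := by
        rw [PySem.Dict.contains_eq_isSome_get?, hget]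
        rfl
      rw [if_pos hc, PySem.Dict.getD_of_get?_eq_some _ _ hget]

theorem pvB1_eq (G : PySem.Dict String (List (List (String × Int)))) :
    G.items.foldl (fun fs r => fs.insert r.1 (r.2.foldl (fun h d =>
        d.foldl (fun h q => h.insert q.1 (h.getD q.1 0 + q.2)) h) PySem.Dict.empty))
      PySem.Dict.empty = pvBuild G := rfl

theorem pvStat_eq (fs : PySem.Dict String (PySem.Dict String Int)) :
    fs.values.foldl (fun ord h => h.keys.foldl (fun ord s =>
        if s ∈ ord then ord else ord ++ [s]) ord) [] = pvOrdAll fs.items := by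
  simp [PySem.Dict.values, pvOrdAll, pvOrd, List.foldl_map]

theorem pvSF_items (order : List String) (rows : List (String × PySem.Dict String Int))
    (h : order.Nodup) :
    (order.foldl (fun sf s => sf.insert s (rows.foldl (fun h r =>
        if r.2.contains s then h.insert r.1 (r.2.getD s 0) else h) PySem.Dict.empty))
      PySem.Dict.empty).items = order.map (fun s => (s, pvCol s rows)) := by
  have := PySem.Dict.items_foldl_insert_fresh order (fun s => s) (fun s => pvCol s rows)
    PySem.Dict.empty (fun a _ => by simp [PySem.Dict.contains_empty]) (by simpa using h)
  simpa [pvCol] using this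

-- ===== VERDICT (by name: the statement is the Claim_ definition above) =====
theorem function_aggregate_spec : Claim_equal_function_aggregate := by
  intro pc_stats pc_to_func _
  unfold Spec_function_aggregate
  simp only [function_aggregate, function_aggregate_alt]
  generalize (PySem.Dict.ofList (pc_stats.map (fun p => (p.1, (PySem.Dict.ofList p.2).items)))).items = ps
  generalize PySem.Dict.ofList pc_to_func = fd
  -- funcstalls: A's interleaved accumulation = pvBuild of B's groups
  have hF := pv_group (fun pc => fd.getD pc "unknown") ps PySem.Dict.empty
    (by rw [PySem.Dict.keys_empty]; exact List.nodup_nil)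
  rw [show pvBuild PySem.Dict.empty = (PySem.Dict.empty : PySem.Dict String (PySem.Dict String Int)) from rfl] at hF
  beta_reduce at hF
  have hGnd : (ps.foldl (fun g p => if p.2.isEmpty then g
      else g.modify (fd.getD p.1 "unknown") [] (fun l => l ++ [p.2])) PySem.Dict.empty).keys.Nodup := by
    have := pvBstep_nodup (fun pc => fd.getD pc "unknown") ps PySem.Dict.empty
      (by rw [PySem.Dict.keys_empty]; exact List.nodup_nil)
    beta_reduce at this
    exact this
  rw [hF, pvB1_eq]
  -- name the groups dict and its built funcstalls
  generalize hG : ps.foldl (fun g p => if p.2.isEmpty then g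
      else g.modify (fd.getD p.1 "unknown") [] (fun l => l ++ [p.2])) PySem.Dict.empty = G at hGnd ⊢
  -- row facts
  have hrownd : ((pvBuild G).items.map Prod.fst).Nodup := by
    have h2 : (pvBuild G).keys.Nodup := by rw [pvBuild_keys G hGnd]; exact hGnd
    exact h2
  have hrows : ∀ r ∈ (pvBuild G).items, r.2.keys.Nodup := by
    intro r hr
    rw [pvBuild_items G hGnd] at hr
    obtain ⟨x, _, rfl⟩ := List.mem_map.mp hr
    exact pvReduce_nodup x.2
  -- stallfuncs: both items lists equal the transpose characterization
  rw [pv_transpose (pvBuild G).items hrownd hrows, pvStat_eq,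
    pvSF_items _ _ (pvOrdAll_nodup (pvBuild G).items)]
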